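-- pv_equiv track=rewrite | github.com/Dedozer464/Character-analysis- | character_analysis-1.py | assess_personality
-- ===== SOURCE A (Python) =====
-- from typing import List, Dict, Tuple
--
-- def assess_personality(traits: List[str]) -> List[str]:
--     """
--     Assess personality types based on traits
--
--     Args:
--         traits: List of character traits
--
--     Returns:
--         List of personality type classifications
--     """
--     personality_types = []
--
--     if any(t in traits for t in ["caring", "nurturing", "helpful", "loves_everybody", "empathetic"]):
--         personality_types.append("Caregiver")
--
--     if any(t in traits for t in ["analytical", "curious", "observant", "disciplined"]):
--         personality_types.append("Analyst")
--
--     if any(t in traits for t in ["funny", "talkative", "optimistic"]):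
--         personality_types.append("Entertainer")
--
--     if any(t in traits for t in ["emotional", "sympathetic", "emotionally_intelligent"]):
--         personality_types.append("Sensitive")
--
--     if any(t in traits for t in ["loves_everybody", "nurturing", "collaborative"]):
--         personality_types.append("Altruist")
--
--     if any(t in traits for t in ["resilient", "motivated", "adaptable"]):
--         personality_types.append("Achiever")
--
--     if any(t in traits for t in ["creative", "open_minded"]):
--         personality_types.append("Innovator")
--
--     return personality_types if personality_types else ["Neutral"]
-- ===== SOURCE B (Python) =====
-- # Inverted index: one pass over traits, each trait looked up in a keyword->types
-- # map; the triggered types are collected in a set, then emitted in canonical order.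
-- _TYPE_ORDER = ["Caregiver", "Analyst", "Entertainer", "Sensitive",
--                "Altruist", "Achiever", "Innovator"]
--
-- _TRIGGERS = {
--     "caring": ["Caregiver"],
--     "nurturing": ["Caregiver", "Altruist"],
--     "helpful": ["Caregiver"],
--     "loves_everybody": ["Caregiver", "Altruist"],
--     "empathetic": ["Caregiver"],
--     "analytical": ["Analyst"],
--     "curious": ["Analyst"],
--     "observant": ["Analyst"],
--     "disciplined": ["Analyst"],
--     "funny": ["Entertainer"],
--     "talkative": ["Entertainer"],
--     "optimistic": ["Entertainer"],
--     "emotional": ["Sensitive"],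
--     "sympathetic": ["Sensitive"],
--     "emotionally_intelligent": ["Sensitive"],
--     "collaborative": ["Altruist"],
--     "resilient": ["Achiever"],
--     "motivated": ["Achiever"],
--     "adaptable": ["Achiever"],
--     "creative": ["Innovator"],
--     "open_minded": ["Innovator"],
-- }
--
-- def assess_personality(traits):
--     hit = set()
--     for t in traits:
--         for name in _TRIGGERS.get(t, []):
--             hit.add(name)
--     result = [name for name in _TYPE_ORDER if name in hit]
--     return result if result else ["Neutral"]
-- ===== Notes on version B (the rewrite author's own statement) =====
-- stated objective: faster
-- what changed: Inverts the control flow: instead of seven per-type any-scans over the traits list, B makes one pass over traits, looking each trait up in an inverted keyword->types index and collecting the triggered types in a set, then emits them in the canonical type order.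
import Mathlib
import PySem

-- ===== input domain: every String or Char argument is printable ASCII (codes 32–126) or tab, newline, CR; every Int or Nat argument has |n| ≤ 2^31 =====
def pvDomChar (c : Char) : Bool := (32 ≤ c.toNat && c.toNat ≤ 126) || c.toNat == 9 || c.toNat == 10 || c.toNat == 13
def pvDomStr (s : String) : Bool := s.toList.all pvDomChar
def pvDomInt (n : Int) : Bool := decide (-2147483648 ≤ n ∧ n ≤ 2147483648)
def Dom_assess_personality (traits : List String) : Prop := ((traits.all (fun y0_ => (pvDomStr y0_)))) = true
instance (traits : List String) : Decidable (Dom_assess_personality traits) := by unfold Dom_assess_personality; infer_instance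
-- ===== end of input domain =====

-- B inverts A's per-type scans over traits: a single pass over traits through a
-- keyword->types index collects the triggered types in a set, which is then emitted
-- in the canonical type order (objective: alternative).


-- ===== PORT A =====
def assess_personality (traits : List String) : List String :=
  let pt0 : List String := []
  let pt1 := if (["caring", "nurturing", "helpful", "loves_everybody", "empathetic"].any
      (fun t => traits.contains t)) then pt0 ++ ["Caregiver"] else pt0
  let pt2 := if (["analytical", "curious", "observant", "disciplined"].any
      (fun t => traits.contains t)) then pt1 ++ ["Analyst"] else pt1
  let pt3 := if (["funny", "talkative", "optimistic"].any
      (fun t => traits.contains t)) then pt2 ++ ["Entertainer"] else pt2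
  let pt4 := if (["emotional", "sympathetic", "emotionally_intelligent"].any
      (fun t => traits.contains t)) then pt3 ++ ["Sensitive"] else pt3
  let pt5 := if (["loves_everybody", "nurturing", "collaborative"].any
      (fun t => traits.contains t)) then pt4 ++ ["Altruist"] else pt4
  let pt6 := if (["resilient", "motivated", "adaptable"].any
      (fun t => traits.contains t)) then pt5 ++ ["Achiever"] else pt5
  let pt7 := if (["creative", "open_minded"].any
      (fun t => traits.contains t)) then pt6 ++ ["Innovator"] else pt6
  if pt7 = [] then ["Neutral"] else pt7

-- ===== PORT B =====
def pvTypeOrder : List String :=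
  ["Caregiver", "Analyst", "Entertainer", "Sensitive", "Altruist", "Achiever", "Innovator"]

-- the _TRIGGERS dict literal (distinct keys, insertion order)
def pvTriggers : PySem.Dict String (List String) :=
  PySem.Dict.mk
    [("caring", ["Caregiver"]),
     ("nurturing", ["Caregiver", "Altruist"]),
     ("helpful", ["Caregiver"]),
     ("loves_everybody", ["Caregiver", "Altruist"]),
     ("empathetic", ["Caregiver"]),
     ("analytical", ["Analyst"]),
     ("curious", ["Analyst"]),
     ("observant", ["Analyst"]),
     ("disciplined", ["Analyst"]),
     ("funny", ["Entertainer"]),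
     ("talkative", ["Entertainer"]),
     ("optimistic", ["Entertainer"]),
     ("emotional", ["Sensitive"]),
     ("sympathetic", ["Sensitive"]),
     ("emotionally_intelligent", ["Sensitive"]),
     ("collaborative", ["Altruist"]),
     ("resilient", ["Achiever"]),
     ("motivated", ["Achiever"]),
     ("adaptable", ["Achiever"]),
     ("creative", ["Innovator"]),
     ("open_minded", ["Innovator"])]

def assess_personality_alt (traits : List String) : List String :=
  -- hit = set(); for t in traits: for name in _TRIGGERS.get(t, []): hit.add(name)
  let hit : PySem.Set String :=
    traits.foldl (fun s t => PySem.Set.update s (pvTriggers.getD t [])) PySem.Set.empty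
  let result := pvTypeOrder.filter (fun name => PySem.Set.contains hit name)
  if result = [] then ["Neutral"] else result

-- ===== PRECONDITION & SPEC =====
def Spec_assess_personality (traits : List String) (out : List String) : Prop := out = assess_personality_alt traits
instance (traits : List String) (out : List String) : Decidable (Spec_assess_personality traits out) := by unfold Spec_assess_personality; infer_instance

-- ===== CLAIM (what is proved, stated in full; the proofs are below) =====
def Claim_equal_assess_personality : Prop := ∀ (traits : List String), Dom_assess_personality traits → Spec_assess_personality traits (assess_personality traits)

-- ===== LEMMAS AND PROOFS =====
-- Membership in the set built by B's trait loop.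
theorem pv_mem_fold (traits : List String) (y : String) :
    (y ∈ traits.foldl (fun s t => PySem.Set.update s (pvTriggers.getD t [])) PySem.Set.empty)
      ↔ ∃ t ∈ traits, y ∈ pvTriggers.getD t [] := by
  have h : ∀ (s0 : PySem.Set String),
      (y ∈ traits.foldl (fun s t => PySem.Set.update s (pvTriggers.getD t [])) s0)
        ↔ y ∈ s0 ∨ ∃ t ∈ traits, y ∈ pvTriggers.getD t [] := by
    induction traits with
    | nil => intro s0; simp
    | cons a l ih =>
      intro s0
      simp only [List.foldl_cons, ih, PySem.Set.mem_update, List.mem_cons]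
      constructor
      · rintro ((h | h) | ⟨t, ht, hy⟩)
        · exact Or.inl h
        · exact Or.inr ⟨a, Or.inl rfl, h⟩
        · exact Or.inr ⟨t, Or.inr ht, hy⟩
      · rintro (h | ⟨t, (rfl | ht), hy⟩)
        · exact Or.inl (Or.inl h)
        · exact Or.inl (Or.inr hy)
        · exact Or.inr ⟨t, ht, hy⟩
  simpa [PySem.Set.empty] using h PySem.Set.empty

-- B's hit for a given type name coincides with A's any-scan over that type's keywords.
theorem pv_bridge (traits : List String) (name : String) (kws : List String)
    (hchar : ∀ t : String, name ∈ pvTriggers.getD t [] ↔ t ∈ kws) :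
    PySem.Set.contains
      (traits.foldl (fun s t => PySem.Set.update s (pvTriggers.getD t [])) PySem.Set.empty) name
      = kws.any (fun t => traits.contains t) := by
  rcases h : kws.any (fun t => traits.contains t) with _ | _
  · rw [Bool.eq_false_iff]
    intro hc
    obtain ⟨t, ht, hy⟩ := (pv_mem_fold traits name).mp ((PySem.Set.contains_iff _ _).mp hc)
    rw [List.any_eq_false] at h
    exact absurd (show traits.contains t = true by simpa using ht) (h t ((hchar t).mp hy))
  · rw [List.any_eq_true] at h
    obtain ⟨t, hk, ht⟩ := h
    exact (PySem.Set.contains_iff _ _).mpr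
      ((pv_mem_fold traits name).mpr ⟨t, by simpa using ht, (hchar t).mpr hk⟩)

-- Evaluation of the literal-dict lookup as an if-chain over the keys.
set_option maxHeartbeats 1000000 in
theorem pv_trig_eval (t : String) : pvTriggers.getD t [] =
    if "caring" = t then ["Caregiver"] else
    if "nurturing" = t then ["Caregiver", "Altruist"] else
    if "helpful" = t then ["Caregiver"] else
    if "loves_everybody" = t then ["Caregiver", "Altruist"] else
    if "empathetic" = t then ["Caregiver"] else
    if "analytical" = t then ["Analyst"] else
    if "curious" = t then ["Analyst"] else
    if "observant" = t then ["Analyst"] else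
    if "disciplined" = t then ["Analyst"] else
    if "funny" = t then ["Entertainer"] else
    if "talkative" = t then ["Entertainer"] else
    if "optimistic" = t then ["Entertainer"] else
    if "emotional" = t then ["Sensitive"] else
    if "sympathetic" = t then ["Sensitive"] else
    if "emotionally_intelligent" = t then ["Sensitive"] else
    if "collaborative" = t then ["Altruist"] else
    if "resilient" = t then ["Achiever"] else
    if "motivated" = t then ["Achiever"] else
    if "adaptable" = t then ["Achiever"] else
    if "creative" = t then ["Innovator"] else
    if "open_minded" = t then ["Innovator"] else [] := by
  have hnil : (PySem.Dict.mk ([] : List (String × List String))).get? t = none := rfl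
  simp only [pvTriggers, PySem.Dict.getD_eq_get?_getD, PySem.Dict.get?_mk_cons, beq_iff_eq,
    apply_ite (fun o : Option (List String) => o.getD ([] : List String)), Option.getD_some,
    hnil, Option.getD_none]

set_option maxHeartbeats 1000000 in
theorem pv_char_Caregiver (t : String) : "Caregiver" ∈ pvTriggers.getD t [] ↔
    t ∈ (["caring", "nurturing", "helpful", "loves_everybody", "empathetic"] : List String) := by
  rw [pv_trig_eval]
  by_cases h_caring : "caring" = t
  · rw [if_pos h_caring]; subst h_caring; decide
  rw [if_neg h_caring]
  by_cases h_nurturing : "nurturing" = t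
  · rw [if_pos h_nurturing]; subst h_nurturing; decide
  rw [if_neg h_nurturing]
  by_cases h_helpful : "helpful" = t
  · rw [if_pos h_helpful]; subst h_helpful; decide
  rw [if_neg h_helpful]
  by_cases h_loves_everybody : "loves_everybody" = t
  · rw [if_pos h_loves_everybody]; subst h_loves_everybody; decide
  rw [if_neg h_loves_everybody]
  by_cases h_empathetic : "empathetic" = t
  · rw [if_pos h_empathetic]; subst h_empathetic; decide
  rw [if_neg h_empathetic]
  by_cases h_analytical : "analytical" = t
  · rw [if_pos h_analytical]; subst h_analytical; decide
  rw [if_neg h_analytical]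
  by_cases h_curious : "curious" = t
  · rw [if_pos h_curious]; subst h_curious; decide
  rw [if_neg h_curious]
  by_cases h_observant : "observant" = t
  · rw [if_pos h_observant]; subst h_observant; decide
  rw [if_neg h_observant]
  by_cases h_disciplined : "disciplined" = t
  · rw [if_pos h_disciplined]; subst h_disciplined; decide
  rw [if_neg h_disciplined]
  by_cases h_funny : "funny" = t
  · rw [if_pos h_funny]; subst h_funny; decide
  rw [if_neg h_funny]
  by_cases h_talkative : "talkative" = t
  · rw [if_pos h_talkative]; subst h_talkative; decide
  rw [if_neg h_talkative]
  by_cases h_optimistic : "optimistic" = t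
  · rw [if_pos h_optimistic]; subst h_optimistic; decide
  rw [if_neg h_optimistic]
  by_cases h_emotional : "emotional" = t
  · rw [if_pos h_emotional]; subst h_emotional; decide
  rw [if_neg h_emotional]
  by_cases h_sympathetic : "sympathetic" = t
  · rw [if_pos h_sympathetic]; subst h_sympathetic; decide
  rw [if_neg h_sympathetic]
  by_cases h_emotionally_intelligent : "emotionally_intelligent" = t
  · rw [if_pos h_emotionally_intelligent]; subst h_emotionally_intelligent; decide
  rw [if_neg h_emotionally_intelligent]
  by_cases h_collaborative : "collaborative" = t
  · rw [if_pos h_collaborative]; subst h_collaborative; decide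
  rw [if_neg h_collaborative]
  by_cases h_resilient : "resilient" = t
  · rw [if_pos h_resilient]; subst h_resilient; decide
  rw [if_neg h_resilient]
  by_cases h_motivated : "motivated" = t
  · rw [if_pos h_motivated]; subst h_motivated; decide
  rw [if_neg h_motivated]
  by_cases h_adaptable : "adaptable" = t
  · rw [if_pos h_adaptable]; subst h_adaptable; decide
  rw [if_neg h_adaptable]
  by_cases h_creative : "creative" = t
  · rw [if_pos h_creative]; subst h_creative; decide
  rw [if_neg h_creative]
  by_cases h_open_minded : "open_minded" = t
  · rw [if_pos h_open_minded]; subst h_open_minded; decide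
  rw [if_neg h_open_minded]
  simp only [List.mem_cons, List.not_mem_nil, or_false, false_iff]
  rintro (rfl | rfl | rfl | rfl | rfl)
  · exact h_caring rfl
  · exact h_nurturing rfl
  · exact h_helpful rfl
  · exact h_loves_everybody rfl
  · exact h_empathetic rfl

set_option maxHeartbeats 1000000 in
theorem pv_char_Analyst (t : String) : "Analyst" ∈ pvTriggers.getD t [] ↔
    t ∈ (["analytical", "curious", "observant", "disciplined"] : List String) := by
  rw [pv_trig_eval]
  by_cases h_caring : "caring" = t
  · rw [if_pos h_caring]; subst h_caring; decide
  rw [if_neg h_caring]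
  by_cases h_nurturing : "nurturing" = t
  · rw [if_pos h_nurturing]; subst h_nurturing; decide
  rw [if_neg h_nurturing]
  by_cases h_helpful : "helpful" = t
  · rw [if_pos h_helpful]; subst h_helpful; decide
  rw [if_neg h_helpful]
  by_cases h_loves_everybody : "loves_everybody" = t
  · rw [if_pos h_loves_everybody]; subst h_loves_everybody; decide
  rw [if_neg h_loves_everybody]
  by_cases h_empathetic : "empathetic" = t
  · rw [if_pos h_empathetic]; subst h_empathetic; decide
  rw [if_neg h_empathetic]
  by_cases h_analytical : "analytical" = t
  · rw [if_pos h_analytical]; subst h_analytical; decide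
  rw [if_neg h_analytical]
  by_cases h_curious : "curious" = t
  · rw [if_pos h_curious]; subst h_curious; decide
  rw [if_neg h_curious]
  by_cases h_observant : "observant" = t
  · rw [if_pos h_observant]; subst h_observant; decide
  rw [if_neg h_observant]
  by_cases h_disciplined : "disciplined" = t
  · rw [if_pos h_disciplined]; subst h_disciplined; decide
  rw [if_neg h_disciplined]
  by_cases h_funny : "funny" = t
  · rw [if_pos h_funny]; subst h_funny; decide
  rw [if_neg h_funny]
  by_cases h_talkative : "talkative" = t
  · rw [if_pos h_talkative]; subst h_talkative; decide
  rw [if_neg h_talkative]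
  by_cases h_optimistic : "optimistic" = t
  · rw [if_pos h_optimistic]; subst h_optimistic; decide
  rw [if_neg h_optimistic]
  by_cases h_emotional : "emotional" = t
  · rw [if_pos h_emotional]; subst h_emotional; decide
  rw [if_neg h_emotional]
  by_cases h_sympathetic : "sympathetic" = t
  · rw [if_pos h_sympathetic]; subst h_sympathetic; decide
  rw [if_neg h_sympathetic]
  by_cases h_emotionally_intelligent : "emotionally_intelligent" = t
  · rw [if_pos h_emotionally_intelligent]; subst h_emotionally_intelligent; decide
  rw [if_neg h_emotionally_intelligent]
  by_cases h_collaborative : "collaborative" = t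
  · rw [if_pos h_collaborative]; subst h_collaborative; decide
  rw [if_neg h_collaborative]
  by_cases h_resilient : "resilient" = t
  · rw [if_pos h_resilient]; subst h_resilient; decide
  rw [if_neg h_resilient]
  by_cases h_motivated : "motivated" = t
  · rw [if_pos h_motivated]; subst h_motivated; decide
  rw [if_neg h_motivated]
  by_cases h_adaptable : "adaptable" = t
  · rw [if_pos h_adaptable]; subst h_adaptable; decide
  rw [if_neg h_adaptable]
  by_cases h_creative : "creative" = t
  · rw [if_pos h_creative]; subst h_creative; decide
  rw [if_neg h_creative]
  by_cases h_open_minded : "open_minded" = t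
  · rw [if_pos h_open_minded]; subst h_open_minded; decide
  rw [if_neg h_open_minded]
  simp only [List.mem_cons, List.not_mem_nil, or_false, false_iff]
  rintro (rfl | rfl | rfl | rfl)
  · exact h_analytical rfl
  · exact h_curious rfl
  · exact h_observant rfl
  · exact h_disciplined rfl

set_option maxHeartbeats 1000000 in
theorem pv_char_Entertainer (t : String) : "Entertainer" ∈ pvTriggers.getD t [] ↔
    t ∈ (["funny", "talkative", "optimistic"] : List String) := by
  rw [pv_trig_eval]
  by_cases h_caring : "caring" = t
  · rw [if_pos h_caring]; subst h_caring; decide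
  rw [if_neg h_caring]
  by_cases h_nurturing : "nurturing" = t
  · rw [if_pos h_nurturing]; subst h_nurturing; decide
  rw [if_neg h_nurturing]
  by_cases h_helpful : "helpful" = t
  · rw [if_pos h_helpful]; subst h_helpful; decide
  rw [if_neg h_helpful]
  by_cases h_loves_everybody : "loves_everybody" = t
  · rw [if_pos h_loves_everybody]; subst h_loves_everybody; decide
  rw [if_neg h_loves_everybody]
  by_cases h_empathetic : "empathetic" = t
  · rw [if_pos h_empathetic]; subst h_empathetic; decide
  rw [if_neg h_empathetic]
  by_cases h_analytical : "analytical" = t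
  · rw [if_pos h_analytical]; subst h_analytical; decide
  rw [if_neg h_analytical]
  by_cases h_curious : "curious" = t
  · rw [if_pos h_curious]; subst h_curious; decide
  rw [if_neg h_curious]
  by_cases h_observant : "observant" = t
  · rw [if_pos h_observant]; subst h_observant; decide
  rw [if_neg h_observant]
  by_cases h_disciplined : "disciplined" = t
  · rw [if_pos h_disciplined]; subst h_disciplined; decide
  rw [if_neg h_disciplined]
  by_cases h_funny : "funny" = t
  · rw [if_pos h_funny]; subst h_funny; decide
  rw [if_neg h_funny]
  by_cases h_talkative : "talkative" = t
  · rw [if_pos h_talkative]; subst h_talkative; decide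
  rw [if_neg h_talkative]
  by_cases h_optimistic : "optimistic" = t
  · rw [if_pos h_optimistic]; subst h_optimistic; decide
  rw [if_neg h_optimistic]
  by_cases h_emotional : "emotional" = t
  · rw [if_pos h_emotional]; subst h_emotional; decide
  rw [if_neg h_emotional]
  by_cases h_sympathetic : "sympathetic" = t
  · rw [if_pos h_sympathetic]; subst h_sympathetic; decide
  rw [if_neg h_sympathetic]
  by_cases h_emotionally_intelligent : "emotionally_intelligent" = t
  · rw [if_pos h_emotionally_intelligent]; subst h_emotionally_intelligent; decide
  rw [if_neg h_emotionally_intelligent]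
  by_cases h_collaborative : "collaborative" = t
  · rw [if_pos h_collaborative]; subst h_collaborative; decide
  rw [if_neg h_collaborative]
  by_cases h_resilient : "resilient" = t
  · rw [if_pos h_resilient]; subst h_resilient; decide
  rw [if_neg h_resilient]
  by_cases h_motivated : "motivated" = t
  · rw [if_pos h_motivated]; subst h_motivated; decide
  rw [if_neg h_motivated]
  by_cases h_adaptable : "adaptable" = t
  · rw [if_pos h_adaptable]; subst h_adaptable; decide
  rw [if_neg h_adaptable]
  by_cases h_creative : "creative" = t
  · rw [if_pos h_creative]; subst h_creative; decide
  rw [if_neg h_creative]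
  by_cases h_open_minded : "open_minded" = t
  · rw [if_pos h_open_minded]; subst h_open_minded; decide
  rw [if_neg h_open_minded]
  simp only [List.mem_cons, List.not_mem_nil, or_false, false_iff]
  rintro (rfl | rfl | rfl)
  · exact h_funny rfl
  · exact h_talkative rfl
  · exact h_optimistic rfl

set_option maxHeartbeats 1000000 in
theorem pv_char_Sensitive (t : String) : "Sensitive" ∈ pvTriggers.getD t [] ↔
    t ∈ (["emotional", "sympathetic", "emotionally_intelligent"] : List String) := by
  rw [pv_trig_eval]
  by_cases h_caring : "caring" = t
  · rw [if_pos h_caring]; subst h_caring; decide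
  rw [if_neg h_caring]
  by_cases h_nurturing : "nurturing" = t
  · rw [if_pos h_nurturing]; subst h_nurturing; decide
  rw [if_neg h_nurturing]
  by_cases h_helpful : "helpful" = t
  · rw [if_pos h_helpful]; subst h_helpful; decide
  rw [if_neg h_helpful]
  by_cases h_loves_everybody : "loves_everybody" = t
  · rw [if_pos h_loves_everybody]; subst h_loves_everybody; decide
  rw [if_neg h_loves_everybody]
  by_cases h_empathetic : "empathetic" = t
  · rw [if_pos h_empathetic]; subst h_empathetic; decide
  rw [if_neg h_empathetic]
  by_cases h_analytical : "analytical" = t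
  · rw [if_pos h_analytical]; subst h_analytical; decide
  rw [if_neg h_analytical]
  by_cases h_curious : "curious" = t
  · rw [if_pos h_curious]; subst h_curious; decide
  rw [if_neg h_curious]
  by_cases h_observant : "observant" = t
  · rw [if_pos h_observant]; subst h_observant; decide
  rw [if_neg h_observant]
  by_cases h_disciplined : "disciplined" = t
  · rw [if_pos h_disciplined]; subst h_disciplined; decide
  rw [if_neg h_disciplined]
  by_cases h_funny : "funny" = t
  · rw [if_pos h_funny]; subst h_funny; decide
  rw [if_neg h_funny]
  by_cases h_talkative : "talkative" = t
  · rw [if_pos h_talkative]; subst h_talkative; decide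
  rw [if_neg h_talkative]
  by_cases h_optimistic : "optimistic" = t
  · rw [if_pos h_optimistic]; subst h_optimistic; decide
  rw [if_neg h_optimistic]
  by_cases h_emotional : "emotional" = t
  · rw [if_pos h_emotional]; subst h_emotional; decide
  rw [if_neg h_emotional]
  by_cases h_sympathetic : "sympathetic" = t
  · rw [if_pos h_sympathetic]; subst h_sympathetic; decide
  rw [if_neg h_sympathetic]
  by_cases h_emotionally_intelligent : "emotionally_intelligent" = t
  · rw [if_pos h_emotionally_intelligent]; subst h_emotionally_intelligent; decide
  rw [if_neg h_emotionally_intelligent]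
  by_cases h_collaborative : "collaborative" = t
  · rw [if_pos h_collaborative]; subst h_collaborative; decide
  rw [if_neg h_collaborative]
  by_cases h_resilient : "resilient" = t
  · rw [if_pos h_resilient]; subst h_resilient; decide
  rw [if_neg h_resilient]
  by_cases h_motivated : "motivated" = t
  · rw [if_pos h_motivated]; subst h_motivated; decide
  rw [if_neg h_motivated]
  by_cases h_adaptable : "adaptable" = t
  · rw [if_pos h_adaptable]; subst h_adaptable; decide
  rw [if_neg h_adaptable]
  by_cases h_creative : "creative" = t
  · rw [if_pos h_creative]; subst h_creative; decide
  rw [if_neg h_creative]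
  by_cases h_open_minded : "open_minded" = t
  · rw [if_pos h_open_minded]; subst h_open_minded; decide
  rw [if_neg h_open_minded]
  simp only [List.mem_cons, List.not_mem_nil, or_false, false_iff]
  rintro (rfl | rfl | rfl)
  · exact h_emotional rfl
  · exact h_sympathetic rfl
  · exact h_emotionally_intelligent rfl

set_option maxHeartbeats 1000000 in
theorem pv_char_Altruist (t : String) : "Altruist" ∈ pvTriggers.getD t [] ↔
    t ∈ (["loves_everybody", "nurturing", "collaborative"] : List String) := by
  rw [pv_trig_eval]
  by_cases h_caring : "caring" = t
  · rw [if_pos h_caring]; subst h_caring; decide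
  rw [if_neg h_caring]
  by_cases h_nurturing : "nurturing" = t
  · rw [if_pos h_nurturing]; subst h_nurturing; decide
  rw [if_neg h_nurturing]
  by_cases h_helpful : "helpful" = t
  · rw [if_pos h_helpful]; subst h_helpful; decide
  rw [if_neg h_helpful]
  by_cases h_loves_everybody : "loves_everybody" = t
  · rw [if_pos h_loves_everybody]; subst h_loves_everybody; decide
  rw [if_neg h_loves_everybody]
  by_cases h_empathetic : "empathetic" = t
  · rw [if_pos h_empathetic]; subst h_empathetic; decide
  rw [if_neg h_empathetic]
  by_cases h_analytical : "analytical" = t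
  · rw [if_pos h_analytical]; subst h_analytical; decide
  rw [if_neg h_analytical]
  by_cases h_curious : "curious" = t
  · rw [if_pos h_curious]; subst h_curious; decide
  rw [if_neg h_curious]
  by_cases h_observant : "observant" = t
  · rw [if_pos h_observant]; subst h_observant; decide
  rw [if_neg h_observant]
  by_cases h_disciplined : "disciplined" = t
  · rw [if_pos h_disciplined]; subst h_disciplined; decide
  rw [if_neg h_disciplined]
  by_cases h_funny : "funny" = t
  · rw [if_pos h_funny]; subst h_funny; decide
  rw [if_neg h_funny]
  by_cases h_talkative : "talkative" = t
  · rw [if_pos h_talkative]; subst h_talkative; decide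
  rw [if_neg h_talkative]
  by_cases h_optimistic : "optimistic" = t
  · rw [if_pos h_optimistic]; subst h_optimistic; decide
  rw [if_neg h_optimistic]
  by_cases h_emotional : "emotional" = t
  · rw [if_pos h_emotional]; subst h_emotional; decide
  rw [if_neg h_emotional]
  by_cases h_sympathetic : "sympathetic" = t
  · rw [if_pos h_sympathetic]; subst h_sympathetic; decide
  rw [if_neg h_sympathetic]
  by_cases h_emotionally_intelligent : "emotionally_intelligent" = t
  · rw [if_pos h_emotionally_intelligent]; subst h_emotionally_intelligent; decide
  rw [if_neg h_emotionally_intelligent]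
  by_cases h_collaborative : "collaborative" = t
  · rw [if_pos h_collaborative]; subst h_collaborative; decide
  rw [if_neg h_collaborative]
  by_cases h_resilient : "resilient" = t
  · rw [if_pos h_resilient]; subst h_resilient; decide
  rw [if_neg h_resilient]
  by_cases h_motivated : "motivated" = t
  · rw [if_pos h_motivated]; subst h_motivated; decide
  rw [if_neg h_motivated]
  by_cases h_adaptable : "adaptable" = t
  · rw [if_pos h_adaptable]; subst h_adaptable; decide
  rw [if_neg h_adaptable]
  by_cases h_creative : "creative" = t
  · rw [if_pos h_creative]; subst h_creative; decide
  rw [if_neg h_creative]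
  by_cases h_open_minded : "open_minded" = t
  · rw [if_pos h_open_minded]; subst h_open_minded; decide
  rw [if_neg h_open_minded]
  simp only [List.mem_cons, List.not_mem_nil, or_false, false_iff]
  rintro (rfl | rfl | rfl)
  · exact h_loves_everybody rfl
  · exact h_nurturing rfl
  · exact h_collaborative rfl

set_option maxHeartbeats 1000000 in
theorem pv_char_Achiever (t : String) : "Achiever" ∈ pvTriggers.getD t [] ↔
    t ∈ (["resilient", "motivated", "adaptable"] : List String) := by
  rw [pv_trig_eval]
  by_cases h_caring : "caring" = t
  · rw [if_pos h_caring]; subst h_caring; decide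
  rw [if_neg h_caring]
  by_cases h_nurturing : "nurturing" = t
  · rw [if_pos h_nurturing]; subst h_nurturing; decide
  rw [if_neg h_nurturing]
  by_cases h_helpful : "helpful" = t
  · rw [if_pos h_helpful]; subst h_helpful; decide
  rw [if_neg h_helpful]
  by_cases h_loves_everybody : "loves_everybody" = t
  · rw [if_pos h_loves_everybody]; subst h_loves_everybody; decide
  rw [if_neg h_loves_everybody]
  by_cases h_empathetic : "empathetic" = t
  · rw [if_pos h_empathetic]; subst h_empathetic; decide
  rw [if_neg h_empathetic]
  by_cases h_analytical : "analytical" = t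
  · rw [if_pos h_analytical]; subst h_analytical; decide
  rw [if_neg h_analytical]
  by_cases h_curious : "curious" = t
  · rw [if_pos h_curious]; subst h_curious; decide
  rw [if_neg h_curious]
  by_cases h_observant : "observant" = t
  · rw [if_pos h_observant]; subst h_observant; decide
  rw [if_neg h_observant]
  by_cases h_disciplined : "disciplined" = t
  · rw [if_pos h_disciplined]; subst h_disciplined; decide
  rw [if_neg h_disciplined]
  by_cases h_funny : "funny" = t
  · rw [if_pos h_funny]; subst h_funny; decide
  rw [if_neg h_funny]
  by_cases h_talkative : "talkative" = t
  · rw [if_pos h_talkative]; subst h_talkative; decide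
  rw [if_neg h_talkative]
  by_cases h_optimistic : "optimistic" = t
  · rw [if_pos h_optimistic]; subst h_optimistic; decide
  rw [if_neg h_optimistic]
  by_cases h_emotional : "emotional" = t
  · rw [if_pos h_emotional]; subst h_emotional; decide
  rw [if_neg h_emotional]
  by_cases h_sympathetic : "sympathetic" = t
  · rw [if_pos h_sympathetic]; subst h_sympathetic; decide
  rw [if_neg h_sympathetic]
  by_cases h_emotionally_intelligent : "emotionally_intelligent" = t
  · rw [if_pos h_emotionally_intelligent]; subst h_emotionally_intelligent; decide
  rw [if_neg h_emotionally_intelligent]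
  by_cases h_collaborative : "collaborative" = t
  · rw [if_pos h_collaborative]; subst h_collaborative; decide
  rw [if_neg h_collaborative]
  by_cases h_resilient : "resilient" = t
  · rw [if_pos h_resilient]; subst h_resilient; decide
  rw [if_neg h_resilient]
  by_cases h_motivated : "motivated" = t
  · rw [if_pos h_motivated]; subst h_motivated; decide
  rw [if_neg h_motivated]
  by_cases h_adaptable : "adaptable" = t
  · rw [if_pos h_adaptable]; subst h_adaptable; decide
  rw [if_neg h_adaptable]
  by_cases h_creative : "creative" = t
  · rw [if_pos h_creative]; subst h_creative; decide
  rw [if_neg h_creative]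
  by_cases h_open_minded : "open_minded" = t
  · rw [if_pos h_open_minded]; subst h_open_minded; decide
  rw [if_neg h_open_minded]
  simp only [List.mem_cons, List.not_mem_nil, or_false, false_iff]
  rintro (rfl | rfl | rfl)
  · exact h_resilient rfl
  · exact h_motivated rfl
  · exact h_adaptable rfl

set_option maxHeartbeats 1000000 in
theorem pv_char_Innovator (t : String) : "Innovator" ∈ pvTriggers.getD t [] ↔
    t ∈ (["creative", "open_minded"] : List String) := by
  rw [pv_trig_eval]
  by_cases h_caring : "caring" = t
  · rw [if_pos h_caring]; subst h_caring; decide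
  rw [if_neg h_caring]
  by_cases h_nurturing : "nurturing" = t
  · rw [if_pos h_nurturing]; subst h_nurturing; decide
  rw [if_neg h_nurturing]
  by_cases h_helpful : "helpful" = t
  · rw [if_pos h_helpful]; subst h_helpful; decide
  rw [if_neg h_helpful]
  by_cases h_loves_everybody : "loves_everybody" = t
  · rw [if_pos h_loves_everybody]; subst h_loves_everybody; decide
  rw [if_neg h_loves_everybody]
  by_cases h_empathetic : "empathetic" = t
  · rw [if_pos h_empathetic]; subst h_empathetic; decide
  rw [if_neg h_empathetic]
  by_cases h_analytical : "analytical" = t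
  · rw [if_pos h_analytical]; subst h_analytical; decide
  rw [if_neg h_analytical]
  by_cases h_curious : "curious" = t
  · rw [if_pos h_curious]; subst h_curious; decide
  rw [if_neg h_curious]
  by_cases h_observant : "observant" = t
  · rw [if_pos h_observant]; subst h_observant; decide
  rw [if_neg h_observant]
  by_cases h_disciplined : "disciplined" = t
  · rw [if_pos h_disciplined]; subst h_disciplined; decide
  rw [if_neg h_disciplined]
  by_cases h_funny : "funny" = t
  · rw [if_pos h_funny]; subst h_funny; decide
  rw [if_neg h_funny]
  by_cases h_talkative : "talkative" = t
  · rw [if_pos h_talkative]; subst h_talkative; decide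
  rw [if_neg h_talkative]
  by_cases h_optimistic : "optimistic" = t
  · rw [if_pos h_optimistic]; subst h_optimistic; decide
  rw [if_neg h_optimistic]
  by_cases h_emotional : "emotional" = t
  · rw [if_pos h_emotional]; subst h_emotional; decide
  rw [if_neg h_emotional]
  by_cases h_sympathetic : "sympathetic" = t
  · rw [if_pos h_sympathetic]; subst h_sympathetic; decide
  rw [if_neg h_sympathetic]
  by_cases h_emotionally_intelligent : "emotionally_intelligent" = t
  · rw [if_pos h_emotionally_intelligent]; subst h_emotionally_intelligent; decide
  rw [if_neg h_emotionally_intelligent]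
  by_cases h_collaborative : "collaborative" = t
  · rw [if_pos h_collaborative]; subst h_collaborative; decide
  rw [if_neg h_collaborative]
  by_cases h_resilient : "resilient" = t
  · rw [if_pos h_resilient]; subst h_resilient; decide
  rw [if_neg h_resilient]
  by_cases h_motivated : "motivated" = t
  · rw [if_pos h_motivated]; subst h_motivated; decide
  rw [if_neg h_motivated]
  by_cases h_adaptable : "adaptable" = t
  · rw [if_pos h_adaptable]; subst h_adaptable; decide
  rw [if_neg h_adaptable]
  by_cases h_creative : "creative" = t
  · rw [if_pos h_creative]; subst h_creative; decide
  rw [if_neg h_creative]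
  by_cases h_open_minded : "open_minded" = t
  · rw [if_pos h_open_minded]; subst h_open_minded; decide
  rw [if_neg h_open_minded]
  simp only [List.mem_cons, List.not_mem_nil, or_false, false_iff]
  rintro (rfl | rfl)
  · exact h_creative rfl
  · exact h_open_minded rfl

-- ===== VERDICT (by name: the statement is the Claim_ definition above) =====
set_option maxHeartbeats 1000000 in
theorem assess_personality_spec : Claim_equal_assess_personality := by
  intro traits _
  unfold Spec_assess_personality assess_personality assess_personality_alt pvTypeOrder
  simp only [List.filter_cons, List.filter_nil,
    pv_bridge traits "Caregiver" _ pv_char_Caregiver,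
    pv_bridge traits "Analyst" _ pv_char_Analyst,
    pv_bridge traits "Entertainer" _ pv_char_Entertainer,
    pv_bridge traits "Sensitive" _ pv_char_Sensitive,
    pv_bridge traits "Altruist" _ pv_char_Altruist,
    pv_bridge traits "Achiever" _ pv_char_Achiever,
    pv_bridge traits "Innovator" _ pv_char_Innovator]
  generalize ((["caring", "nurturing", "helpful", "loves_everybody", "empathetic"] : List String).any (fun t => traits.contains t)) = c1
  generalize ((["analytical", "curious", "observant", "disciplined"] : List String).any (fun t => traits.contains t)) = c2
  generalize ((["funny", "talkative", "optimistic"] : List String).any (fun t => traits.contains t)) = c3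
  generalize ((["emotional", "sympathetic", "emotionally_intelligent"] : List String).any (fun t => traits.contains t)) = c4
  generalize ((["loves_everybody", "nurturing", "collaborative"] : List String).any (fun t => traits.contains t)) = c5
  generalize ((["resilient", "motivated", "adaptable"] : List String).any (fun t => traits.contains t)) = c6
  generalize ((["creative", "open_minded"] : List String).any (fun t => traits.contains t)) = c7
  cases c1 <;> cases c2 <;> cases c3 <;> cases c4 <;> cases c5 <;> cases c6 <;> cases c7 <;> rfl
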